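-- pv_equiv track=rewrite | github.com/SoniaComp/Algorithm_Python_2021 | python/week19/BOJ17436.py | solution
-- ===== SOURCE A (Python) =====
-- from itertools import combinations
-- from operator import mul
-- from functools import reduce
--
-- def solution(prime_nums, N, M):
--     ans = 0
--     '''
--     for i in prime_nums:
--         ans += M // i
--     for i in list(combinations(prime_nums, 2)):
--         ans -= M // (i[0]*i[1])
--     for i in list(combinations(prime_nums, 3)):
--         ans += M // (i[0]*i[1]*i[2])
--     '''
--     for i in range(1, N+1):
--         flag = (-1) ** (i+1)
--         for j in combinations(prime_nums, i):
--             ans += M // reduce(mul, j) * flag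
--     return ans
-- ===== SOURCE B (Python) =====
-- def solution(prime_nums, N, M):
--     # Build (product, size) for every subset incrementally, then one inclusion-exclusion pass.
--     subs = [(1, 0)]
--     for p in prime_nums:
--         subs = subs + [(d * p, k + 1) for (d, k) in subs]
--     ans = 0
--     for (d, k) in subs:
--         if 1 <= k <= N:
--             ans += M // d * (-1) ** (k + 1)
--     return ans
-- ===== Notes on version B (the rewrite author's own statement) =====
-- stated objective: alternative
-- what changed: Replaces the size-stratified double loop over itertools.combinations with reduce-products by one incremental build of all subset (product, size) pairs followed by a single inclusion-exclusion summation pass.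
import Mathlib
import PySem

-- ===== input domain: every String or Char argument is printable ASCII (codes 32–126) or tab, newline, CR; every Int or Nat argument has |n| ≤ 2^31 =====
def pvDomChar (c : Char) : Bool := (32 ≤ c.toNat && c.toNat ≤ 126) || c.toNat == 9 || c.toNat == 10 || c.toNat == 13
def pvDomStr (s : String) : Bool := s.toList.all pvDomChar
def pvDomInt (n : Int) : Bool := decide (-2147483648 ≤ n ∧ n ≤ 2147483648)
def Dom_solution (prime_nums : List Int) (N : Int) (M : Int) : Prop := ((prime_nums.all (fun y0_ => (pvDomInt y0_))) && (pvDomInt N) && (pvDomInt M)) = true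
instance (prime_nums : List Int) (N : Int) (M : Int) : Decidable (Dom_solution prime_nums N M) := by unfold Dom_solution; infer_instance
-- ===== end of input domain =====

-- B replaces A's size-stratified combinations double loop by one incremental build of all
-- subset (product, size) pairs followed by a single inclusion-exclusion pass (objective: alternative).

-- ===== PORT A =====
-- itertools.combinations(xs, k), in itertools' (lexicographic-by-index) order
def pyCombos : List Int → Nat → List (List Int)
  | _, 0 => [[]]
  | [], _ + 1 => []
  | x :: xs, k + 1 => (pyCombos xs k).map (x :: ·) ++ pyCombos xs (k + 1)

-- reduce(mul, j): fold of * over j starting from its first element (j is nonempty in A's loop)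
def pyReduceMul (j : List Int) : Int :=
  match j with
  | [] => 0
  | h :: t => t.foldl (· * ·) h

def solution (prime_nums : List Int) (N : Int) (M : Int) : Int :=
  (PySem.List.pyRange 1 (N + 1) 1).foldl (fun ans i =>
    -- flag = (-1) ** (i+1); i ≥ 1 in the loop so the exponent is the Nat (i+1).toNat
    (pyCombos prime_nums i.toNat).foldl (fun ans j =>
      ans + PySem.Int.floordiv M (pyReduceMul j) * (-1 : Int) ^ (i + 1).toNat) ans) 0

-- ===== PORT B =====
def solution_alt (prime_nums : List Int) (N : Int) (M : Int) : Int :=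
  let subs := prime_nums.foldl
    (fun subs p => subs ++ subs.map (fun dk => (dk.1 * p, dk.2 + 1)))
    [((1 : Int), (0 : Int))]
  subs.foldl (fun ans dk =>
    if 1 ≤ dk.2 ∧ dk.2 ≤ N then
      ans + PySem.Int.floordiv M dk.1 * (-1 : Int) ^ (dk.2 + 1).toNat
    else ans) 0

-- ===== PRECONDITION & SPEC =====
-- Pre_ excludes exactly the inputs where the Python A raises ZeroDivisionError
-- (0 among the primes with N ≥ 1: the singleton subset gives M // 0); B raises there too.
def Pre_solution (prime_nums : List Int) (N : Int) (M : Int) : Prop :=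
  N < 1 ∨ (0 : Int) ∉ prime_nums
instance (prime_nums : List Int) (N : Int) (M : Int) : Decidable (Pre_solution prime_nums N M) := by
  unfold Pre_solution; infer_instance

def pvWitness_solution : List Int × Int × Int := ([2, 3, 5], 3, 100)

def Spec_solution (prime_nums : List Int) (N : Int) (M : Int) (out : Int) : Prop := out = solution_alt prime_nums N M
instance (prime_nums : List Int) (N : Int) (M : Int) (out : Int) : Decidable (Spec_solution prime_nums N M out) := by unfold Spec_solution; infer_instance

-- ===== CLAIM (what is proved, stated in full; the proofs are below) =====
def Claim_equal_solution : Prop := ∀ (prime_nums : List Int) (N : Int) (M : Int), Dom_solution prime_nums N M → Pre_solution prime_nums N M → Spec_solution prime_nums N M (solution prime_nums N M)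

-- ===== LEMMAS AND PROOFS =====

-- the signed inclusion-exclusion contribution of one subset with product d and size k
def pvTerm (N M d k : Int) : Int :=
  if 1 ≤ k ∧ k ≤ N then PySem.Int.floordiv M d * (-1 : Int) ^ (k + 1).toNat else 0

-- one step of B's subset-building loop
def pvStep (subs : List (Int × Int)) (p : Int) : List (Int × Int) :=
  subs ++ subs.map (fun dk => (dk.1 * p, dk.2 + 1))

def pvSumg (N M : Int) (l : List (Int × Int)) : Int :=
  (l.map (fun dk => pvTerm N M dk.1 dk.2)).sum

-- the total contribution of all size-m subsets, relative to an ambient (d, k)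
def pvCs (N M : Int) (xs : List Int) (m : Nat) (d k : Int) : Int :=
  ((pyCombos xs m).map (fun j => pvTerm N M (d * j.foldl (· * ·) 1) (k + (m : Int)))).sum

-- sum of f over 0, 1, …, n-1 as a list sum
def pvRS (f : Nat → Int) (n : Nat) : Int := ((List.range n).map f).sum

lemma pvMulFoldl (j : List Int) (a : Int) : j.foldl (· * ·) a = a * j.foldl (· * ·) 1 := by
  induction j generalizing a with
  | nil => simp
  | cons x t ih =>
    simp only [List.foldl_cons]
    rw [ih (a * x), ih (1 * x)]; ring

lemma pvCombos_nil_of_lt : ∀ (xs : List Int) (m : Nat), xs.length < m → pyCombos xs m = [] := by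
  intro xs
  induction xs with
  | nil => intro m hm; cases m with
    | zero => omega
    | succ m' => simp [pyCombos]
  | cons x xs ih =>
    intro m hm
    cases m with
    | zero => simp at hm
    | succ m' =>
      simp only [pyCombos]
      rw [ih m' (by simpa using hm), ih (m' + 1) (by simp at hm; omega)]
      simp

lemma pvCombos_length : ∀ (xs : List Int) (m : Nat) (j : List Int), j ∈ pyCombos xs m → j.length = m := by
  intro xs
  induction xs with
  | nil => intro m j hj; cases m with
    | zero => simp [pyCombos] at hj; simp [hj]
    | succ m' => simp [pyCombos] at hj
  | cons x xs ih =>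
    intro m j hj
    cases m with
    | zero => simp [pyCombos] at hj; simp [hj]
    | succ m' =>
      simp only [pyCombos, List.mem_append, List.mem_map] at hj
      rcases hj with ⟨j', hj', rfl⟩ | hj'
      · simp [ih m' j' hj']
      · exact ih (m' + 1) j hj'

lemma pvFoldl_perm (xs : List Int) : ∀ l l' : List (Int × Int), l.Perm l' →
    (xs.foldl pvStep l).Perm (xs.foldl pvStep l') := by
  induction xs with
  | nil => intro l l' h; exact h
  | cons x xs ih =>
    intro l l' h
    simp only [List.foldl_cons]
    exact ih _ _ (h.append (h.map _))

lemma pvSumg_perm (N M : Int) (l l' : List (Int × Int)) (h : l.Perm l') :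
    pvSumg N M l = pvSumg N M l' := List.Perm.sum_eq (h.map _)

lemma pvStep_append_perm (a b : List (Int × Int)) (x : Int) :
    (pvStep (a ++ b) x).Perm (pvStep a x ++ pvStep b x) := by
  simp only [pvStep, List.map_append, List.append_assoc]
  apply List.Perm.append_left
  rw [← List.append_assoc, ← List.append_assoc]
  exact List.perm_append_comm.append_right _

lemma pvSumg_foldl_append (N M : Int) : ∀ (xs : List Int) (a b : List (Int × Int)),
    pvSumg N M (xs.foldl pvStep (a ++ b)) =
      pvSumg N M (xs.foldl pvStep a) + pvSumg N M (xs.foldl pvStep b) := by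
  intro xs
  induction xs with
  | nil => intro a b; simp [pvSumg]
  | cons x xs ih =>
    intro a b
    simp only [List.foldl_cons]
    rw [pvSumg_perm N M _ _ (pvFoldl_perm xs _ _ (pvStep_append_perm a b x)),
        ← List.foldl_cons, List.foldl_cons, ih]

lemma pvRS_succ_right (f : Nat → Int) (n : Nat) : pvRS f (n + 1) = pvRS f n + f n := by
  simp [pvRS, List.range_succ]

lemma pvRS_succ_left (f : Nat → Int) (n : Nat) :
    pvRS f (n + 1) = f 0 + pvRS (fun i => f (i + 1)) n := by
  simp [pvRS, List.range_succ_eq_map, List.map_map, Function.comp_def]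

lemma pvRS_add (f g : Nat → Int) (n : Nat) :
    pvRS (fun m => f m + g m) n = pvRS f n + pvRS g n := by
  induction n with
  | zero => simp [pvRS]
  | succ n ih => rw [pvRS_succ_right, pvRS_succ_right, pvRS_succ_right, ih]; ring

lemma pvRS_ext (f : Nat → Int) {a b : Nat} (hab : a ≤ b) (h0 : ∀ m, a ≤ m → f m = 0) :
    pvRS f b = pvRS f a := by
  obtain ⟨c, rfl⟩ := Nat.exists_eq_add_of_le hab
  rw [pvRS, List.range_add, List.map_append, List.sum_append, List.map_map]
  have hz : (List.range c).map (f ∘ (a + ·)) = (List.range c).map (fun _ => (0 : Int)) :=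
    List.map_eq_map_iff.mpr (fun x _ => h0 _ (Nat.le_add_right a x))
  rw [hz]; simp [pvRS]

lemma pvRS_congr (f g : Nat → Int) (n : Nat) (h : ∀ i, i < n → f i = g i) :
    pvRS f n = pvRS g n := by
  unfold pvRS
  rw [List.map_eq_map_iff.mpr (fun i hi => h i (List.mem_range.mp hi))]

lemma pvCs_zero (N M : Int) (xs : List Int) (d k : Int) :
    pvCs N M xs 0 d k = pvTerm N M (d * 1) (k + 0) := by
  cases xs <;> simp [pvCs, pyCombos]

lemma pvCs_succ_cons (N M : Int) (x : Int) (xs : List Int) (m : Nat) (d k : Int) :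
    pvCs N M (x :: xs) (m + 1) d k = pvCs N M xs m (d * x) (k + 1) + pvCs N M xs (m + 1) d k := by
  simp only [pvCs, pyCombos, List.map_append, List.sum_append, List.map_map]
  congr 1
  · apply congrArg List.sum
    apply List.map_eq_map_iff.mpr
    intro j _
    simp only [Function.comp_apply]
    have hf : (x :: j).foldl (· * ·) 1 = x * j.foldl (· * ·) 1 := by
      rw [List.foldl_cons, pvMulFoldl j (1 * x)]; ring
    rw [hf]
    have harg : d * (x * j.foldl (· * ·) 1) = d * x * j.foldl (· * ·) 1 := by ring
    have hcast : k + ((m + 1 : Nat) : Int) = k + 1 + (m : Int) := by push_cast; ring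
    rw [harg, hcast]

lemma pvMain (N M : Int) : ∀ (xs : List Int) (d k : Int),
    pvSumg N M (xs.foldl pvStep [(d, k)]) =
      pvRS (fun m => pvCs N M xs m d k) (xs.length + 1) := by
  intro xs
  induction xs with
  | nil =>
    intro d k
    simp [pvRS, pvSumg, pvCs_zero]
  | cons x xs ih =>
    intro d k
    have hstep : pvStep [(d, k)] x = [(d, k)] ++ [(d * x, k + 1)] := rfl
    rw [List.foldl_cons, hstep, pvSumg_foldl_append, ih d k, ih (d * x) (k + 1)]
    simp only [List.length_cons]
    have hlast : pvCs N M xs (xs.length + 1) d k = 0 := by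
      simp [pvCs, pvCombos_nil_of_lt xs (xs.length + 1) (by omega)]
    rw [pvRS_succ_left (fun m => pvCs N M (x :: xs) m d k) (xs.length + 1)]
    have hsplit :
        pvRS (fun i => pvCs N M (x :: xs) (i + 1) d k) (xs.length + 1) =
          pvRS (fun i => pvCs N M xs i (d * x) (k + 1)) (xs.length + 1) +
          pvRS (fun i => pvCs N M xs (i + 1) d k) (xs.length + 1) := by
      rw [← pvRS_add]
      exact pvRS_congr _ _ _ (fun i _ => pvCs_succ_cons N M x xs i d k)
    rw [hsplit, pvRS_succ_right (fun i => pvCs N M xs (i + 1) d k) xs.length, hlast]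
    have hfirst : pvRS (fun m => pvCs N M xs m d k) (xs.length + 1) =
        pvCs N M (x :: xs) 0 d k + pvRS (fun i => pvCs N M xs (i + 1) d k) xs.length := by
      rw [pvRS_succ_left (fun m => pvCs N M xs m d k) xs.length, pvCs_zero, ← pvCs_zero N M (x :: xs)]
    rw [hfirst]
    ring

lemma pvB_eq (pn : List Int) (N M : Int) :
    solution_alt pn N M = pvSumg N M (pn.foldl pvStep [(1, 0)]) := by
  show (pn.foldl pvStep [((1 : Int), (0 : Int))]).foldl _ 0 = _
  have hfun : (fun (ans : Int) (dk : Int × Int) =>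
      if 1 ≤ dk.2 ∧ dk.2 ≤ N then ans + PySem.Int.floordiv M dk.1 * (-1 : Int) ^ (dk.2 + 1).toNat else ans)
      = fun ans dk => ans + pvTerm N M dk.1 dk.2 := by
    funext ans dk
    simp only [pvTerm]
    split_ifs <;> simp
  rw [hfun, PySem.List.foldl_add]
  simp [pvSumg]

lemma pvReduceMul_cons (h : Int) (t : List Int) :
    pyReduceMul (h :: t) = 1 * (h :: t).foldl (· * ·) 1 := by
  simp only [pyReduceMul, List.foldl_cons]
  rw [pvMulFoldl t h, pvMulFoldl t (1 * h)]
  ring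

lemma pvA_eq (pn : List Int) (N M : Int) :
    solution pn N M =
      pvRS (fun i => ((pyCombos pn ((1 + (i : Int)).toNat)).map (fun j =>
        PySem.Int.floordiv M (pyReduceMul j) * (-1 : Int) ^ ((1 + (i : Int)) + 1).toNat)).sum) N.toNat := by
  show (PySem.List.pyRange 1 (N + 1) 1).foldl _ 0 = _
  have hfun : (fun (ans : Int) (i : Int) =>
      (pyCombos pn i.toNat).foldl (fun ans j =>
        ans + PySem.Int.floordiv M (pyReduceMul j) * (-1 : Int) ^ (i + 1).toNat) ans)
      = fun ans i => ans + ((pyCombos pn i.toNat).map (fun j =>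
        PySem.Int.floordiv M (pyReduceMul j) * (-1 : Int) ^ (i + 1).toNat)).sum := by
    funext ans i
    exact PySem.List.foldl_add _ _ _
  rw [hfun, PySem.List.foldl_add, PySem.List.pyRange_one]
  have hN : (N + 1 - 1) = N := by ring
  rw [hN, List.map_map]
  simp [pvRS, Function.comp_def]

lemma pvW_zero_zero (N M : Int) (pn : List Int) : pvCs N M pn 0 1 0 = 0 := by
  rw [pvCs_zero]
  simp [pvTerm]

lemma pvW_zero_of_gtN (N M : Int) (pn : List Int) (m : Nat) (h : N < (m : Int)) :
    pvCs N M pn m 1 0 = 0 := by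
  unfold pvCs
  have hz : ∀ j ∈ pyCombos pn m,
      pvTerm N M (1 * j.foldl (· * ·) 1) (0 + (m : Int)) = (fun _ => (0 : Int)) j := by
    intro j _
    simp only [pvTerm]
    rw [if_neg]
    rintro ⟨_, h2⟩
    omega
  rw [List.map_eq_map_iff.mpr hz]
  simp

lemma pvW_zero_of_gtLen (N M : Int) (pn : List Int) (m : Nat) (h : pn.length < m) :
    pvCs N M pn m 1 0 = 0 := by
  simp [pvCs, pvCombos_nil_of_lt pn m h]

lemma pvAi_eq_W (pn : List Int) (N M : Int) (i : Nat) (hi : i < N.toNat) :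
    ((pyCombos pn ((1 + (i : Int)).toNat)).map (fun j =>
      PySem.Int.floordiv M (pyReduceMul j) * (-1 : Int) ^ ((1 + (i : Int)) + 1).toNat)).sum
      = pvCs N M pn (i + 1) 1 0 := by
  have ht : ((1 : Int) + i).toNat = i + 1 := by omega
  rw [ht]
  unfold pvCs
  apply congrArg List.sum
  apply List.map_eq_map_iff.mpr
  intro j hj
  have hlen := pvCombos_length pn (i + 1) j hj
  obtain ⟨h, t, rfl⟩ : ∃ h t, j = h :: t := by
    cases j with
    | nil => simp at hlen
    | cons h t => exact ⟨h, t, rfl⟩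
  have hc : (1 : Int) ≤ 0 + ((i + 1 : Nat) : Int) ∧ (0 : Int) + ((i + 1 : Nat) : Int) ≤ N := by
    constructor <;> omega
  rw [show pvTerm N M (1 * (h :: t).foldl (· * ·) 1) (0 + ((i + 1 : Nat) : Int)) =
        PySem.Int.floordiv M (1 * (h :: t).foldl (· * ·) 1) *
          (-1 : Int) ^ ((0 + ((i + 1 : Nat) : Int)) + 1).toNat from by
      simp only [pvTerm]; rw [if_pos hc]]
  rw [← pvReduceMul_cons]
  have hexp : ((1 : Int) + (i : Int) + 1).toNat = ((0 + ((i + 1 : Nat) : Int)) + 1).toNat := by omega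
  rw [hexp]

-- ===== VERDICT (by name: the statement is the Claim_ definition above) =====
theorem solution_spec : Claim_equal_solution := by
  intro pn N M _ _
  simp only [Spec_solution]
  rw [pvA_eq, pvB_eq, pvMain]
  rw [pvRS_congr _ (fun i => pvCs N M pn (i + 1) 1 0) N.toNat (fun i hi => pvAi_eq_W pn N M i hi)]
  have hKsucc : pvRS (fun m => pvCs N M pn m 1 0) (N.toNat + 1) =
      pvRS (fun i => pvCs N M pn (i + 1) 1 0) N.toNat := by
    rw [pvRS_succ_left (fun m => pvCs N M pn m 1 0) N.toNat, pvW_zero_zero, zero_add]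
  rw [← hKsucc]
  have hB : pvRS (fun m => pvCs N M pn m 1 0) (max (N.toNat + 1) (pn.length + 1)) =
      pvRS (fun m => pvCs N M pn m 1 0) (N.toNat + 1) := by
    apply pvRS_ext _ (le_max_left _ _)
    intro m hm
    exact pvW_zero_of_gtN N M pn m (by omega)
  have hA : pvRS (fun m => pvCs N M pn m 1 0) (max (N.toNat + 1) (pn.length + 1)) =
      pvRS (fun m => pvCs N M pn m 1 0) (pn.length + 1) := by
    apply pvRS_ext _ (le_max_right _ _)
    intro m hm
    exact pvW_zero_of_gtLen N M pn m (by omega)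
  rw [← hB, hA]
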